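-- pv_equiv track=rewrite | github.com/RuslanLebj/TinkoffEducation-test-2024 | task_3.py | list_directories
-- ===== SOURCE A (Python) =====
-- def list_directories(input_data):
--     from collections import defaultdict
--     import sys
--
--     # Вспомогательная функция для создания рекурсивного словаря
--     def recursive_dd():
--         return defaultdict(recursive_dd)
--
--     # Чтение количества директорий
--     n = int(input_data[0])
--     paths = input_data[1:n+1]
--
--     # Создание корня дерева директорий
--     directory_tree = recursive_dd()
--
--     # Заполнение дерева директорий
--     for path in paths:
--         parts = path.split('/')
--         node = directory_tree
--         for part in parts:
--             node = node[part]
--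
--     # Вспомогательная функция для вывода структуры директорий
--     def print_tree(node, depth=0):
--         keys = sorted(node.keys())
--         result = []
--         for key in keys:
--             result.append('  ' * depth + key)
--             result.extend(print_tree(node[key], depth + 1))
--         return result
--
--     return print_tree(directory_tree)
-- ===== SOURCE B (Python) =====
-- def list_directories(input_data):
--     n = int(input_data[0])
--     prefixes = set()
--     for path in input_data[1:n+1]:
--         parts = path.split('/')
--         for i in range(1, len(parts) + 1):
--             prefixes.add(tuple(parts[:i]))
--     return ['  ' * (len(parts) - 1) + parts[-1] for parts in sorted(prefixes)]
-- ===== Notes on version B (the rewrite author's own statement) =====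
-- stated objective: simpler
-- what changed: Replaces the recursive-defaultdict trie plus recursive per-level sorted printing with one flat set of all cumulative path prefixes, sorted once by their component tuples and rendered in a single pass.
import Mathlib
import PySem

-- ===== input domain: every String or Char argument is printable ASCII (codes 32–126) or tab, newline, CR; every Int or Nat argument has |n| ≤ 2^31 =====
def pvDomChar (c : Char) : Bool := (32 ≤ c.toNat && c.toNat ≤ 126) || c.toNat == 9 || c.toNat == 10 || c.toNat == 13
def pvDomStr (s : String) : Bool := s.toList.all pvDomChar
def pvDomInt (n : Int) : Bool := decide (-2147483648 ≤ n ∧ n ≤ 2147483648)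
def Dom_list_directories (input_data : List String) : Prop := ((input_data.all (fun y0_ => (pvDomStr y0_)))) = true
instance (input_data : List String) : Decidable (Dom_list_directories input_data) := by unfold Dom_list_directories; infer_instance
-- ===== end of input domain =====

-- B replaces A's recursive-defaultdict trie + recursive sorted printing by one flat set of all
-- cumulative path prefixes, sorted once componentwise and rendered in a single pass (objective: simpler).

-- shared primitives (both Pythons call path.split('/') and use '  ' * k)
-- path.split('/'): sep ≠ "" so PySem.Str.split? is always `some`; exact on the domain
def pySplit (s : String) : List String := (PySem.Str.split? s "/").getD []
-- '  ' * k (k : Nat here; both programs only multiply by non-negative counts)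
def pyRepeatStr (s : String) (n : Nat) : String := (List.replicate n s).foldl (· ++ ·) ""

-- ===== PORT A =====
-- A's recursive defaultdict node, rendered as a first-key/child/siblings chain (insertion order kept)
inductive PNode where
  | nil : PNode
  | cons : String → PNode → PNode → PNode
deriving DecidableEq, Repr

def pFind : PNode → String → Option PNode
  | .nil, _ => none
  | .cons k c rest, x => if k = x then some c else pFind rest x

-- dict assignment: overwrite in place if the key exists, else append
def pUpdate : PNode → String → PNode → PNode
  | .nil, x, v => .cons x v .nil
  | .cons k c rest, x, v => if k = x then .cons k v rest else .cons k c (pUpdate rest x v)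

-- the inner `for part in parts: node = node[part]` loop of A (defaultdict creates missing nodes)
def pInsertPath : PNode → List String → PNode
  | t, [] => t
  | t, p :: ps => pUpdate t p (pInsertPath ((pFind t p).getD .nil) ps)

def pItems : PNode → List (String × PNode)
  | .nil => []
  | .cons k c rest => (k, c) :: pItems rest

def pSize : PNode → Nat
  | .nil => 0
  | .cons _ c rest => pSize c + pSize rest + 1

def pItemsSize (l : List (String × PNode)) : Nat := (l.map (fun kc => pSize kc.2)).sum + l.length

theorem pItemsSize_sorted (l : List (String × PNode)) :
    pItemsSize (PySem.List.sorted l (fun kc => kc.1) false) = pItemsSize l := by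
  have h := PySem.List.sorted_perm l (fun kc => kc.1) false
  unfold pItemsSize
  rw [(h.map (fun kc => pSize kc.2)).sum_eq, h.length_eq]

theorem pItemsSize_items (t : PNode) : pItemsSize (pItems t) = pSize t := by
  induction t with
  | nil => rfl
  | cons k c rest ihc ihr => simp [pItems, pItemsSize, pSize] at *; omega

-- A's print_tree: keys are sorted per level and node[key] is visited; dict keys are distinct,
-- so this is exactly iterating the (key, child) items sorted by key
def pPrintGo : List (String × PNode) → Nat → List String
  | [], _ => []
  | (k, c) :: rest, d =>
    (pyRepeatStr "  " d ++ k) ::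
      (pPrintGo (PySem.List.sorted (pItems c) (fun kc => kc.1) false) (d + 1) ++ pPrintGo rest d)
termination_by l _ => pItemsSize l
decreasing_by
  · rw [pItemsSize_sorted, pItemsSize_items]; simp [pItemsSize]; omega
  · simp [pItemsSize]; omega

def list_directories (input_data : List String) : List String :=
  match PySem.List.pyGet? input_data 0 with
  | none => []        -- IndexError: excluded by Pre_
  | some s0 =>
    match PySem.Int.ofStr? s0 with
    | none => []      -- ValueError: excluded by Pre_
    | some n =>
      let paths := PySem.List.slice input_data (some 1) (some (n + 1))
      let tree := paths.foldl (fun t path => pInsertPath t (pySplit path)) PNode.nil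
      pPrintGo (PySem.List.sorted (pItems tree) (fun kc => kc.1) false) 0

-- ===== PORT B =====
def list_directories_alt (input_data : List String) : List String :=
  match PySem.List.pyGet? input_data 0 with
  | none => []        -- IndexError: excluded by Pre_
  | some s0 =>
    match PySem.Int.ofStr? s0 with
    | none => []      -- ValueError: excluded by Pre_
    | some n =>
      let paths := PySem.List.slice input_data (some 1) (some (n + 1))
      let prefixes : PySem.Set (List String) := paths.foldl (fun s path =>
        let parts := pySplit path
        (PySem.List.pyRange 1 ((parts.length : Int) + 1) 1).foldl
          (fun s i => PySem.Set.add s (PySem.List.slice parts none (some i))) s) PySem.Set.empty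
      (PySem.List.sorted prefixes (fun p => p) false).map
        (fun parts => pyRepeatStr "  " (parts.length - 1) ++ PySem.List.pyGetD parts (-1) "")

-- ===== PRECONDITION & SPEC =====
-- Pre_ excludes exactly the inputs where A raises: an empty list (IndexError on input_data[0])
-- or a first element that int() rejects (ValueError)
def Pre_list_directories (input_data : List String) : Prop :=
  input_data ≠ [] ∧ (PySem.Int.ofStr? (input_data.headD "")).isSome = true
instance (input_data : List String) : Decidable (Pre_list_directories input_data) := by
  unfold Pre_list_directories; infer_instance

def pvWitness_list_directories : List String := ["2", "b/c", "a"]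

def Spec_list_directories (input_data : List String) (out : List String) : Prop := out = list_directories_alt input_data
instance (input_data : List String) (out : List String) : Decidable (Spec_list_directories input_data out) := by unfold Spec_list_directories; infer_instance

-- ===== CLAIM (what is proved, stated in full; the proofs are below) =====
def Claim_equal_list_directories : Prop := ∀ (input_data : List String), Dom_list_directories input_data → Pre_list_directories input_data → Spec_list_directories input_data (list_directories input_data)

-- ===== LEMMAS AND PROOFS =====

-- the line printed for a node whose full path (from the root) is p
def pvRender (p : List String) : String :=
  pyRepeatStr "  " (p.length - 1) ++ PySem.List.pyGetD p (-1) ""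

-- does the chain of keys p lead to a node of the trie?
def pFollows : PNode → List String → Bool
  | _, [] => true
  | t, k :: ks =>
    match pFind t k with
    | some c => pFollows c ks
    | none => false

def pKeys (t : PNode) : List String := (pItems t).map (fun kc => kc.1)

-- every level of the trie has distinct keys (true of every dict; kept as an invariant)
def pWF : PNode → Bool
  | .nil => true
  | .cons k c rest => pWF c && pWF rest && !((pKeys rest).contains k)

-- prefix sequences emitted by A's DFS, tracking the path from the root instead of the depth
def pDfsGo : List (String × PNode) → List String → List (List String)
  | [], _ => []
  | (k, c) :: rest, pre =>
    (pre ++ [k]) ::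
      (pDfsGo (PySem.List.sorted (pItems c) (fun kc => kc.1) false) (pre ++ [k]) ++ pDfsGo rest pre)
termination_by l _ => pItemsSize l
decreasing_by
  · rw [pItemsSize_sorted, pItemsSize_items]; simp [pItemsSize]; omega
  · simp [pItemsSize]; omega

theorem pFind_eq_none (t : PNode) (x : String) : pFind t x = none ↔ ¬ x ∈ pKeys t := by
  induction t with
  | nil => simp [pFind, pKeys, pItems]
  | cons k c rest ihc ihr =>
    by_cases h : k = x
    · subst h; simp [pFind, pKeys, pItems]
    · simp [pFind, h, pKeys, pItems, show ¬ x = k from fun e => h e.symm] at ihr ⊢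
      simpa [pKeys] using ihr

theorem pFind_wf (t : PNode) (x : String) (c : PNode) (hwf : pWF t = true)
    (h : pFind t x = some c) : pWF c = true := by
  induction t generalizing c with
  | nil => simp [pFind] at h
  | cons k c' rest ihc ihr =>
    simp [pWF] at hwf
    by_cases hk : k = x
    · simp [pFind, hk] at h; exact h ▸ hwf.1.1
    · simp [pFind, hk] at h; exact ihr c hwf.1.2 h

theorem mem_items_iff_find (t : PNode) (x : String) (c : PNode) (hwf : pWF t = true) :
    (x, c) ∈ pItems t ↔ pFind t x = some c := by
  induction t with
  | nil => simp [pItems, pFind]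
  | cons k c' rest ihc ihr =>
    simp [pWF] at hwf
    by_cases hk : k = x
    · subst hk
      have hnk : ¬ k ∈ pKeys rest := by
        simpa [List.contains_iff_mem] using hwf.2
      have hnone : pFind rest k = none := (pFind_eq_none rest k).mpr hnk
      simp [pItems, pFind, ihr hwf.1.2, hnone, eq_comm]
    · simp [pItems, pFind, hk, show ¬ x = k from fun e => hk e.symm, ihr hwf.1.2]

theorem pKeys_nodup (t : PNode) (hwf : pWF t = true) : (pKeys t).Nodup := by
  induction t with
  | nil => simp [pKeys, pItems]
  | cons k c rest ihc ihr =>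
    simp [pWF] at hwf
    simp only [pKeys, pItems, List.map_cons, List.nodup_cons]
    refine ⟨?_, ihr hwf.1.2⟩
    simpa [List.contains_iff_mem, pKeys] using hwf.2

theorem pFind_update (t : PNode) (x : String) (v : PNode) (y : String) :
    pFind (pUpdate t x v) y = if y = x then some v else pFind t y := by
  induction t with
  | nil =>
    by_cases h : y = x
    · simp [pUpdate, pFind, h]
    · simp [pUpdate, pFind, h, show ¬ x = y from fun e => h e.symm]
  | cons k c rest ihc ihr =>
    by_cases hk : k = x
    · subst hk
      by_cases hy : y = k
      · simp [pUpdate, pFind, hy]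
      · simp [pUpdate, pFind, hy, show ¬ k = y from fun e => hy e.symm]
    · by_cases hy : y = k
      · subst hy
        simp [pUpdate, hk, pFind, show ¬ y = x from fun e => hk (by simp [e])]
      · simp [pUpdate, hk, pFind, show ¬ k = y from fun e => hy e.symm, ihr]

theorem pKeys_update (t : PNode) (x : String) (v : PNode) :
    pKeys (pUpdate t x v) = if x ∈ pKeys t then pKeys t else pKeys t ++ [x] := by
  induction t with
  | nil => simp [pUpdate, pKeys, pItems]
  | cons k c rest ihc ihr =>
    by_cases hk : k = x
    · subst hk; simp [pUpdate, pKeys, pItems]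
    · simp only [pUpdate, if_neg hk, pKeys, pItems, List.map_cons] at ihr ⊢
      rw [ihr]
      by_cases hm : x ∈ (pItems rest).map (fun kc => kc.1) <;>
        simp [pKeys, hm, show ¬ x = k from fun e => hk e.symm]

theorem pWF_update (t : PNode) (x : String) (v : PNode) (hwf : pWF t = true)
    (hv : pWF v = true) : pWF (pUpdate t x v) = true := by
  induction t with
  | nil => simp [pUpdate, pWF, hv, pKeys, pItems]
  | cons k c rest ihc ihr =>
    simp [pWF] at hwf
    by_cases hk : k = x
    · subst hk; simp [pUpdate, pWF, hv, hwf.1.2, hwf.2]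
    · simp only [pUpdate, if_neg hk, pWF, Bool.and_eq_true, Bool.not_eq_true']
      refine ⟨⟨hwf.1.1, ihr hwf.1.2⟩, ?_⟩
      rw [pKeys_update]
      by_cases hm : x ∈ pKeys rest
      · simpa [hm] using hwf.2
      · simp [hm, List.contains_iff_mem] at hwf ⊢
        exact ⟨by simpa [List.contains_iff_mem] using hwf.2, fun e => hk e⟩

theorem pWF_insertPath (t : PNode) (q : List String) (hwf : pWF t = true) :
    pWF (pInsertPath t q) = true := by
  induction q generalizing t with
  | nil => simpa [pInsertPath]
  | cons p ps ih =>
    simp only [pInsertPath]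
    apply pWF_update _ _ _ hwf
    apply ih
    cases hf : pFind t p with
    | none => simp [pWF]
    | some c => simpa using pFind_wf t p c hwf hf

theorem pFollows_nil (p : List String) : pFollows PNode.nil p = decide (p = []) := by
  cases p <;> simp [pFollows, pFind]

theorem pFollows_insertPath (t : PNode) (q p : List String) :
    pFollows (pInsertPath t q) p = (pFollows t p || decide (p <+: q)) := by
  induction q generalizing t p with
  | nil =>
    cases p with
    | nil => simp [pInsertPath, pFollows]
    | cons y ys => simp [pInsertPath, pFollows]
  | cons a as ih =>
    cases p with
    | nil => simp [pFollows]
    | cons y ys =>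
      simp only [pInsertPath, pFollows, pFind_update]
      by_cases hy : y = a
      · subst hy
        rw [if_pos rfl]
        show pFollows (pInsertPath ((pFind t y).getD PNode.nil) as) ys = _
        rw [ih]
        cases hf : pFind t y with
        | some c => simp [pFollows, hf, List.cons_prefix_cons]
        | none => cases ys <;> simp [pFollows, pFind, hf, pFollows_nil, List.cons_prefix_cons]
      · simp [hy, pFollows, List.cons_prefix_cons, hy]

theorem pFollows_cons_iff (t : PNode) (k : String) (q : List String) (hwf : pWF t = true) :
    pFollows t (k :: q) = true ↔ ∃ c, (k, c) ∈ pItems t ∧ pFollows c q = true := by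
  simp only [pFollows]
  cases hf : pFind t k with
  | none =>
    simp
    intro c hm
    rw [mem_items_iff_find t k c hwf] at hm
    simp [hm] at hf
  | some c =>
    simp
    constructor
    · intro h; exact ⟨c, (mem_items_iff_find t k c hwf).mpr hf, h⟩
    · rintro ⟨c', hm, h⟩
      rw [mem_items_iff_find t k c' hwf] at hm
      rw [hf] at hm
      exact (Option.some.injEq _ _).mp hm ▸ h

theorem pFollows_foldl (paths : List String) (t : PNode) (p : List String) :
    pFollows (paths.foldl (fun t path => pInsertPath t (pySplit path)) t) p
      = (pFollows t p || paths.any (fun s => decide (p <+: pySplit s))) := by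
  induction paths generalizing t with
  | nil => simp
  | cons s rest ih =>
    simp only [List.foldl_cons, List.any_cons, ih, pFollows_insertPath]
    cases pFollows t p <;> simp [Bool.or_assoc]

theorem pWF_foldl (paths : List String) (t : PNode) (hwf : pWF t = true) :
    pWF (paths.foldl (fun t path => pInsertPath t (pySplit path)) t) = true := by
  induction paths generalizing t with
  | nil => simpa
  | cons s rest ih => exact ih _ (pWF_insertPath _ _ hwf)

theorem pyGetD_append_singleton_neg_one (pre : List String) (k : String) :
    PySem.List.pyGetD (pre ++ [k]) (-1) "" = k := by
  simp [PySem.List.pyGetD, PySem.List.pyGet?, PySem.List.pyIdx?]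

theorem pPrintGo_eq_map_render (l : List (String × PNode)) (d : Nat) :
    ∀ pre : List String, d = pre.length → pPrintGo l d = (pDfsGo l pre).map pvRender := by
  induction l, d using pPrintGo.induct with
  | case1 d => intro pre _; simp [pPrintGo, pDfsGo]
  | case2 k c rest d ih1 ih2 =>
    intro pre hd
    simp only [pPrintGo, pDfsGo, List.map_cons, List.map_append]
    rw [ih1 (pre ++ [k]) (by simp [hd]), ih2 pre hd]
    congr 1
    simp [pvRender, pyGetD_append_singleton_neg_one, hd]

theorem mem_pDfsGo (l : List (String × PNode)) (pre : List String)
    (hwf : ∀ kc ∈ l, pWF kc.2 = true) (p : List String) :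
    p ∈ pDfsGo l pre ↔ ∃ kc ∈ l, ∃ q, pFollows kc.2 q = true ∧ p = pre ++ kc.1 :: q := by
  induction l, pre using pDfsGo.induct with
  | case1 pre => simp [pDfsGo]
  | case2 k c rest pre ih1 ih2 =>
    have hwfc : pWF c = true := hwf (k, c) (by simp)
    have hwf1 : ∀ kc ∈ PySem.List.sorted (pItems c) (fun kc => kc.1) false, pWF kc.2 = true := by
      intro kc hm
      rw [PySem.List.mem_sorted] at hm
      exact pFind_wf c kc.1 kc.2 hwfc ((mem_items_iff_find c kc.1 kc.2 hwfc).mp hm)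
    have hwf2 : ∀ kc ∈ rest, pWF kc.2 = true := fun kc hm => hwf kc (by simp [hm])
    simp only [pDfsGo, List.mem_cons, List.mem_append, ih1 hwf1, ih2 hwf2]
    constructor
    · rintro (h | ⟨kc, hm, q, hf, hp⟩ | ⟨kc, hm, q, hf, hp⟩)
      · exact ⟨(k, c), by simp, [], by simp [pFollows], by simp [h]⟩
      · rw [PySem.List.mem_sorted] at hm
        refine ⟨(k, c), by simp, kc.1 :: q, ?_, by simp [hp]⟩
        exact (pFollows_cons_iff c kc.1 q hwfc).mpr ⟨kc.2, by simpa using hm, hf⟩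
      · exact ⟨kc, by simp [hm], q, hf, hp⟩
    · rintro ⟨kc, hm, q, hf, hp⟩
      rcases hm with he | hm'
      · subst he
        cases q with
        | nil => exact Or.inl (by simpa using hp)
        | cons k1 q1 =>
          rcases (pFollows_cons_iff c k1 q1 hwfc).mp hf with ⟨c1, hm1, hf1⟩
          refine Or.inr (Or.inl ⟨(k1, c1), ?_, q1, hf1, by simpa using hp⟩)
          rw [PySem.List.mem_sorted]; exact hm1
      · exact Or.inr (Or.inr ⟨kc, hm', q, hf, hp⟩)

theorem sorted_keys_strict (c : PNode) (hwf : pWF c = true) :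
    ((PySem.List.sorted (pItems c) (fun kc => kc.1) false).map (fun kc => kc.1)).Pairwise (· < ·) := by
  have hle := PySem.List.sorted_pairwise (xs := pItems c) (key := fun kc => kc.1)
  have hperm : ((PySem.List.sorted (pItems c) (fun kc => kc.1) false).map (fun kc => kc.1)).Perm (pKeys c) :=
    (PySem.List.sorted_perm (pItems c) (fun kc => kc.1) false).map _
  have hnd : ((PySem.List.sorted (pItems c) (fun kc => kc.1) false).map (fun kc => kc.1)).Nodup :=
    hperm.nodup_iff.mpr (pKeys_nodup c hwf)
  have hpl : ((PySem.List.sorted (pItems c) (fun kc => kc.1) false).map (fun kc => kc.1)).Pairwise (· ≤ ·) :=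
    List.pairwise_map.mpr hle
  have := hpl.and hnd
  exact this.imp (fun h => lt_of_le_of_ne h.1 h.2)

theorem nil_lt_cons (a : String) (l : List String) : ([] : List String) < a :: l := List.Lex.nil

theorem pairwise_pDfsGo (l : List (String × PNode)) (pre : List String)
    (hk : (l.map (fun kc => kc.1)).Pairwise (· < ·))
    (hwf : ∀ kc ∈ l, pWF kc.2 = true) :
    (pDfsGo l pre).Pairwise (· < ·) := by
  induction l, pre using pDfsGo.induct with
  | case1 pre => simp [pDfsGo]
  | case2 k c rest pre ih1 ih2 =>
    have hwfc : pWF c = true := hwf (k, c) (by simp)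
    have hwf1 : ∀ kc ∈ PySem.List.sorted (pItems c) (fun kc => kc.1) false, pWF kc.2 = true := by
      intro kc hm
      rw [PySem.List.mem_sorted] at hm
      exact pFind_wf c kc.1 kc.2 hwfc ((mem_items_iff_find c kc.1 kc.2 hwfc).mp hm)
    have hwf2 : ∀ kc ∈ rest, pWF kc.2 = true := fun kc hm => hwf kc (by simp [hm])
    simp only [List.map_cons, List.pairwise_cons] at hk
    have hb1 := ih1 (sorted_keys_strict c hwfc) hwf1
    have hb2 := ih2 hk.2 hwf2
    have hklt : ∀ k' ∈ rest.map (fun kc => kc.1), k < k' := hk.1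
    simp only [pDfsGo, List.pairwise_cons, List.pairwise_append]
    refine ⟨?_, hb1, hb2, ?_⟩
    · intro p hp
      rcases List.mem_append.mp hp with h1 | h2
      · rcases (mem_pDfsGo _ _ hwf1 p).mp h1 with ⟨kc, _, q, _, hpq⟩
        subst hpq
        simpa using List.append_left_lt (l₁ := pre ++ [k]) (nil_lt_cons kc.1 q)
      · rcases (mem_pDfsGo _ _ hwf2 p).mp h2 with ⟨kc, hm, q, _, hpq⟩
        subst hpq
        have hlt : k < kc.1 := hklt kc.1 (List.mem_map_of_mem hm)
        have : (k :: ([] : List String)) < kc.1 :: q := List.Lex.rel hlt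
        simpa using List.append_left_lt (l₁ := pre) this
    · intro p h1 p' h2
      rcases (mem_pDfsGo _ _ hwf1 p).mp h1 with ⟨kc, _, q, _, hpq⟩
      rcases (mem_pDfsGo _ _ hwf2 p').mp h2 with ⟨kc', hm', q', _, hpq'⟩
      subst hpq; subst hpq'
      have hlt : k < kc'.1 := hklt kc'.1 (List.mem_map_of_mem hm')
      have : (k :: (kc.1 :: q)) < kc'.1 :: q' := List.Lex.rel hlt
      simpa using List.append_left_lt (l₁ := pre) this

theorem mem_foldl_add {α β : Type} [BEq β] [LawfulBEq β] (L : List α) (f : α → β)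
    (s0 : PySem.Set β) (x : β) :
    x ∈ L.foldl (fun s v => PySem.Set.add s (f v)) s0 ↔ x ∈ s0 ∨ ∃ v ∈ L, x = f v := by
  induction L generalizing s0 with
  | nil => simp
  | cons a L ih =>
    simp only [List.foldl_cons, ih, PySem.Set.mem_add, List.mem_cons]
    constructor
    · rintro ((h | h) | ⟨v, hv, he⟩)
      · exact Or.inl h
      · exact Or.inr ⟨a, Or.inl rfl, h⟩
      · exact Or.inr ⟨v, Or.inr hv, he⟩
    · rintro (h | ⟨v, (rfl | hv), he⟩)
      · exact Or.inl (Or.inl h)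
      · exact Or.inl (Or.inr he)
      · exact Or.inr ⟨v, hv, he⟩

theorem nodup_foldl_add {α β : Type} [BEq β] [LawfulBEq β] (L : List α) (f : α → β)
    (s0 : PySem.Set β) (h : s0.Nodup) :
    (L.foldl (fun s v => PySem.Set.add s (f v)) s0).Nodup := by
  induction L generalizing s0 with
  | nil => simpa
  | cons a L ih => exact ih _ (PySem.Set.nodup_add s0 (f a) h)

theorem take_prefix_iff (parts p : List String) :
    (∃ i : Int, i ∈ PySem.List.pyRange 1 ((parts.length : Int) + 1) 1 ∧
        p = PySem.List.slice parts none (some i))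
      ↔ p ≠ [] ∧ p <+: parts := by
  constructor
  · rintro ⟨i, hi, rfl⟩
    rw [PySem.List.mem_pyRange_one] at hi
    obtain ⟨h1, h2⟩ := hi
    rw [PySem.List.slice_to _ (by omega)]
    refine ⟨?_, List.take_prefix _ _⟩
    have hlen : (parts.take i.toNat).length = i.toNat := by
      rw [List.length_take]; omega
    intro he
    rw [he] at hlen
    simp at hlen
    omega
  · rintro ⟨hne, hp⟩
    refine ⟨(p.length : Int), ?_, ?_⟩
    · rw [PySem.List.mem_pyRange_one]
      have := hp.length_le
      have : 1 ≤ p.length := by cases p with | nil => simp at hne | cons a l => simp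
      omega
    · rw [PySem.List.slice_to _ (by positivity)]
      simpa using List.prefix_iff_eq_take.mp hp

theorem mem_prefix_fold (paths : List String) (s0 : PySem.Set (List String)) (p : List String) :
    (p ∈ paths.foldl (fun s path =>
        let parts := pySplit path
        (PySem.List.pyRange 1 ((parts.length : Int) + 1) 1).foldl
          (fun s i => PySem.Set.add s (PySem.List.slice parts none (some i))) s) s0)
      ↔ p ∈ s0 ∨ ∃ path ∈ paths, p ≠ [] ∧ p <+: pySplit path := by
  induction paths generalizing s0 with
  | nil => simp
  | cons a paths ih =>
    simp only [List.foldl_cons, ih, mem_foldl_add, List.mem_cons]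
    rw [take_prefix_iff (pySplit a) p]
    constructor
    · rintro ((h | h) | ⟨path, hm, hh⟩)
      · exact Or.inl h
      · exact Or.inr ⟨a, Or.inl rfl, h⟩
      · exact Or.inr ⟨path, Or.inr hm, hh⟩
    · rintro (h | ⟨path, (rfl | hm), hh⟩)
      · exact Or.inl (Or.inl h)
      · exact Or.inl (Or.inr hh)
      · exact Or.inr ⟨path, hm, hh⟩

theorem nodup_prefix_fold (paths : List String) (s0 : PySem.Set (List String)) (h : s0.Nodup) :
    (paths.foldl (fun s path =>
        let parts := pySplit path
        (PySem.List.pyRange 1 ((parts.length : Int) + 1) 1).foldl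
          (fun s i => PySem.Set.add s (PySem.List.slice parts none (some i))) s) s0).Nodup := by
  induction paths generalizing s0 with
  | nil => simpa
  | cons a paths ih => exact ih _ (nodup_foldl_add _ _ _ h)

-- ===== VERDICT (by name: the statement is the Claim_ definition above) =====
theorem list_directories_spec : Claim_equal_list_directories := by
  intro input hdom hpre
  obtain ⟨hne, hsome⟩ := hpre
  unfold Spec_list_directories list_directories list_directories_alt
  cases input with
  | nil => exact absurd rfl hne
  | cons s0 rest =>
    have h0 : PySem.List.pyGet? (s0 :: rest) (0 : Int) = some s0 := by
      simpa using PySem.List.pyGet?_natCast (s0 :: rest) 0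
    obtain ⟨n, hn⟩ := Option.isSome_iff_exists.mp (by simpa using hsome)
    simp only [h0, hn]
    set paths := PySem.List.slice (s0 :: rest) (some 1) (some (n + 1)) with hpaths
    set T := paths.foldl (fun t path => pInsertPath t (pySplit path)) PNode.nil with hT
    have hwfT : pWF T = true := pWF_foldl paths PNode.nil rfl
    have hwfl : ∀ kc ∈ PySem.List.sorted (pItems T) (fun kc => kc.1) false, pWF kc.2 = true := by
      intro kc hm
      rw [PySem.List.mem_sorted] at hm
      exact pFind_wf T kc.1 kc.2 hwfT ((mem_items_iff_find T kc.1 kc.2 hwfT).mp hm)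
    rw [pPrintGo_eq_map_render _ 0 [] rfl]
    set A := pDfsGo (PySem.List.sorted (pItems T) (fun kc => kc.1) false) [] with hA
    have hpwA : A.Pairwise (· < ·) :=
      pairwise_pDfsGo _ _ (sorted_keys_strict T hwfT) hwfl
    have hndA : A.Nodup := hpwA.imp (fun h => ne_of_lt h)
    have hmemA : ∀ p, p ∈ A ↔ ∃ s ∈ paths, p ≠ [] ∧ p <+: pySplit s := by
      intro p
      rw [hA, mem_pDfsGo _ _ hwfl p]
      constructor
      · rintro ⟨kc, hm, q, hf, rfl⟩
        rw [PySem.List.mem_sorted] at hm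
        have hfol : pFollows T (kc.1 :: q) = true :=
          (pFollows_cons_iff T kc.1 q hwfT).mpr ⟨kc.2, hm, hf⟩
        rw [hT, pFollows_foldl, pFollows_nil] at hfol
        simp only [List.any_eq_true, decide_eq_true_eq, Bool.or_eq_true] at hfol
        rcases hfol with h | ⟨s, hs, hpre'⟩
        · simp at h
        · exact ⟨s, hs, by simp, by simpa using hpre'⟩
      · rintro ⟨s, hs, hne', hp⟩
        cases p with
        | nil => exact absurd rfl hne'
        | cons k q =>
          have hfol : pFollows T (k :: q) = true := by
            rw [hT, pFollows_foldl]
            simp only [List.any_eq_true, decide_eq_true_eq, Bool.or_eq_true]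
            exact Or.inr ⟨s, hs, hp⟩
          obtain ⟨c, hm, hf⟩ := (pFollows_cons_iff T k q hwfT).mp hfol
          exact ⟨(k, c), by rw [PySem.List.mem_sorted]; exact hm, q, hf, by simp⟩
    set P := paths.foldl (fun s path =>
        let parts := pySplit path
        (PySem.List.pyRange 1 ((parts.length : Int) + 1) 1).foldl
          (fun s i => PySem.Set.add s (PySem.List.slice parts none (some i))) s)
        PySem.Set.empty with hP
    have hmemP : ∀ p, p ∈ P ↔ ∃ s ∈ paths, p ≠ [] ∧ p <+: pySplit s := by
      intro p
      rw [hP, mem_prefix_fold]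
      simp [PySem.Set.empty]
    have hndP : P.Nodup := nodup_prefix_fold paths PySem.Set.empty (by simp [PySem.Set.empty])
    have hperm : A.Perm P :=
      (List.perm_ext_iff_of_nodup hndA hndP).mpr (fun p => by rw [hmemA p, hmemP p])
    have hsort := PySem.List.sorted_eq_of_perm_of_pairwise_lt P A (fun p => p) hperm (by simpa using hpwA)
    have hsort' : PySem.List.sorted P (fun p => p) false = A := by
      rw [← hsort]; congr 1 <;> exact Subsingleton.elim _ _
    exact (congrArg (List.map pvRender) hsort').symm
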